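-- pv_equiv track=rewrite | github.com/floriankugler/fusion-addins | fusion_api_docs/clean_docs.py | collapse_blank_lines_outside_code
-- ===== SOURCE A (Python) =====
-- def apply_outside_code(text: str, transform) -> str:
--     lines = text.splitlines(keepends=True)
--     fence_indexes = [i for i, line in enumerate(lines) if line.lstrip().startswith("```")]
--     ignored_fences = set()
--     if len(fence_indexes) % 2 == 1 and fence_indexes:
--         ignored_fences.add(fence_indexes[0])
--
--     out = []
--     buf = []
--     in_code = False
--
--     for idx, line in enumerate(lines):
--         is_fence = line.lstrip().startswith("```") and idx not in ignored_fences
--         if in_code: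
--             out.append(line)
--             if is_fence:
--                 in_code = False
--             continue
--         if is_fence:
--             if buf:
--                 out.append(transform("".join(buf)))
--                 buf = []
--             in_code = True
--             out.append(line)
--             continue
--         buf.append(line)
--
--     if buf:
--         out.append(transform("".join(buf)))
--
--     return "".join(out)
--
-- def collapse_blank_lines_outside_code(text: str) -> str:
--     def collapse(chunk: str) -> str:
--         lines = chunk.splitlines()
--         out = []
--         blank = False
--         for line in lines:
--             if line.strip() == "":
--                 if blank:
--                     continue
--                 blank = True
--                 out.append("")
--                 continue
--             blank = False
--             out.append(line)
--         return "\n".join(out) + ("\n" if chunk.endswith("\n") else "")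
--
--     return apply_outside_code(text, collapse)
-- ===== SOURCE B (Python) =====
-- def collapse_blank_lines_outside_code(text: str) -> str:
--     lines = text.splitlines(keepends=True)
--     fence_count = 0
--     first_fence = -1
--     for i, line in enumerate(lines):
--         if line.lstrip().startswith("```"):
--             fence_count += 1
--             if first_fence < 0:
--                 first_fence = i
--     ignored = first_fence if fence_count % 2 == 1 else -1
--
--     out = []
--     in_code = False
--     at_start = True   # no line of the current outside-code region seen yet
--     blank = False     # last emitted line of the current outside region was blank
--     last_nl = False   # did the region's last line end with the character "\n"
--     for i, line in enumerate(lines):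
--         if line.lstrip().startswith("```") and i != ignored:
--             if not in_code and not at_start:
--                 out.append("\n" if last_nl else "")
--             at_start = True
--             blank = False
--             in_code = not in_code
--             out.append(line)
--             continue
--         if in_code:
--             out.append(line)
--             continue
--         if line.endswith("\r\n"):
--             core = line[:-2]
--         elif line.endswith("\n") or line.endswith("\r"):
--             core = line[:-1]
--         else:
--             core = line
--         if core.strip() == "":
--             if not blank:
--                 out.append("" if at_start else "\n")
--                 blank = True
--         else:
--             out.append(core if at_start else "\n" + core)
--             blank = False
--         at_start = False
--         last_nl = line.endswith("\n")
--     if not in_code and not at_start: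
--         out.append("\n" if last_nl else "")
--     return "".join(out)
-- ===== Notes on version B (the rewrite author's own statement) =====
-- stated objective: alternative
-- what changed: B fuses apply_outside_code and the per-chunk collapse transform into one streaming pass over the split lines, maintaining in_code/blank/at_start/last_nl flags and emitting output incrementally, instead of buffering each outside-code region, re-joining it and re-running splitlines inside the collapse helper.
import Mathlib
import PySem

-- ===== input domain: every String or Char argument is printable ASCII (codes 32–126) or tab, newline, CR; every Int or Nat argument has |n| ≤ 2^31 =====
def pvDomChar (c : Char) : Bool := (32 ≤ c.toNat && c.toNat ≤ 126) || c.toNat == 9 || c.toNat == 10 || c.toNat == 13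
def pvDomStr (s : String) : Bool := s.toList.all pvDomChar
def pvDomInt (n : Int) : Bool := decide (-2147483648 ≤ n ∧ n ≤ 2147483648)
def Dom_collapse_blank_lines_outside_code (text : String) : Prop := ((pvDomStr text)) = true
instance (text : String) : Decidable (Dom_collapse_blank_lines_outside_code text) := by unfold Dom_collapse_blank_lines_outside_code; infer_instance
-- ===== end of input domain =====

-- B fuses apply_outside_code and the per-chunk collapse into one streaming pass over the lines
-- (no buffered chunks, no re-join/re-splitlines); same return value, alternative decomposition.

-- ===== PORT A =====

-- shared primitive: hand port of str.splitlines(keepends=True); exact on Dom, where the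
-- only line-break characters a string can contain are '\n' and '\r' (so breaks are \n, \r, \r\n)
def pvLinesKE : List Char → List (List Char)
  | [] => []
  | '\r' :: '\n' :: rest => ['\r', '\n'] :: pvLinesKE rest
  | c :: rest =>
    if c = '\n' then ['\n'] :: pvLinesKE rest
    else if c = '\r' then ['\r'] :: pvLinesKE rest
    else
      match pvLinesKE rest with
      | [] => [[c]]
      | l :: ls => (c :: l) :: ls

-- line.lstrip().startswith("```")
def pvIsFenceLine (l : List Char) : Bool :=
  PySem.Chars.startswith (PySem.Chars.lstrip l) ['`', '`', '`']

-- one step of the inner collapse's blank-collapsing loop (state: out-lines, blank flag)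
def pvCollapseStep (p : List (List Char) × Bool) (line : List Char) : List (List Char) × Bool :=
  if PySem.Chars.strip line = [] then
    if p.2 then p else (p.1 ++ [([] : List Char)], true)
  else (p.1 ++ [line], false)

-- the nested `collapse` transform of A, literally
def pvCollapseChunk (chunk : List Char) : List Char :=
  let lines := PySem.Chars.splitlines chunk
  let st := lines.foldl pvCollapseStep ([], false)
  PySem.Chars.join ['\n'] st.1 ++ (if PySem.Chars.endswith chunk ['\n'] then ['\n'] else [])

-- one step of apply_outside_code's loop; state = (out, buf, in_code)
def pvApplyStep (ignored : PySem.Set Int) (transform : List Char → List Char)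
    (st : List (List Char) × List (List Char) × Bool) (p : Int × List Char) :
    List (List Char) × List (List Char) × Bool :=
  let is_fence := pvIsFenceLine p.2 && !(PySem.Set.contains ignored p.1)
  if st.2.2 then
    (st.1 ++ [p.2], st.2.1, !is_fence)
  else if is_fence then
    ((if st.2.1.isEmpty then st.1
      else st.1 ++ [transform (PySem.Chars.join [] st.2.1)]) ++ [p.2], [], true)
  else (st.1, st.2.1 ++ [p.2], false)

def pvApplyOutsideCode (text : List Char) (transform : List Char → List Char) : List Char :=
  let lines := pvLinesKE text
  let fence_indexes := ((PySem.List.enumerate lines).filter (fun p => pvIsFenceLine p.2)).map (·.1)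
  let ignored : PySem.Set Int :=
    if fence_indexes.length % 2 = 1 ∧ ¬ fence_indexes.isEmpty then
      PySem.Set.add (PySem.Set.ofList []) fence_indexes.headI
    else PySem.Set.ofList []
  let fin := (PySem.List.enumerate lines).foldl (pvApplyStep ignored transform) ([], [], false)
  let out := if fin.2.1.isEmpty then fin.1
             else fin.1 ++ [transform (PySem.Chars.join [] fin.2.1)]
  PySem.Chars.join [] out

def collapse_blank_lines_outside_code (text : String) : String :=
  String.ofList (pvApplyOutsideCode text.toList pvCollapseChunk)

-- ===== PORT B =====

-- the line content with its (single) trailing line break removed, by explicit suffix tests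
def pvAltCore (line : List Char) : List Char :=
  if PySem.Chars.endswith line ['\r', '\n'] then PySem.List.slice line none (some (-2))
  else if PySem.Chars.endswith line ['\n'] || PySem.Chars.endswith line ['\r'] then
    PySem.List.slice line none (some (-1))
  else line

-- one step of B's single fused pass; state = (out, in_code, at_start, blank, last_nl)
def pvAltStep (ignored : Int)
    (st : List (List Char) × Bool × Bool × Bool × Bool) (p : Int × List Char) :
    List (List Char) × Bool × Bool × Bool × Bool :=
  let (out, in_code, at_start, blank, last_nl) := st
  if pvIsFenceLine p.2 && (p.1 != ignored) then
    let out := if !in_code && !at_start then out ++ [if last_nl then ['\n'] else []] else out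
    (out ++ [p.2], !in_code, true, false, last_nl)
  else if in_code then (out ++ [p.2], true, at_start, blank, last_nl)
  else
    let core := pvAltCore p.2
    let out :=
      if PySem.Chars.strip core = [] then
        (if !blank then out ++ [if at_start then [] else ['\n']] else out)
      else out ++ [if at_start then core else '\n' :: core]
    (out, false, false, PySem.Chars.strip core = [], PySem.Chars.endswith p.2 ['\n'])

def collapse_blank_lines_outside_code_alt (text : String) : String :=
  let lines := pvLinesKE text.toList
  let fc := (PySem.List.enumerate lines).foldl
    (fun (st : Int × Int) p =>
      if pvIsFenceLine p.2 then (st.1 + 1, if st.2 < 0 then p.1 else st.2) else st) (0, -1)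
  let ignored : Int := if PySem.Int.mod fc.1 2 = 1 then fc.2 else -1
  let fin := (PySem.List.enumerate lines).foldl (pvAltStep ignored) ([], false, true, false, false)
  let out := if !fin.2.1 && !fin.2.2.1 then fin.1 ++ [if fin.2.2.2.2 then ['\n'] else []]
             else fin.1
  String.ofList (PySem.Chars.join [] out)

-- ===== PRECONDITION & SPEC =====
def Spec_collapse_blank_lines_outside_code (text : String) (out : String) : Prop := out = collapse_blank_lines_outside_code_alt text
instance (text : String) (out : String) : Decidable (Spec_collapse_blank_lines_outside_code text out) := by unfold Spec_collapse_blank_lines_outside_code; infer_instance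

-- ===== CLAIM (what is proved, stated in full; the proofs are below) =====
def Claim_equal_collapse_blank_lines_outside_code : Prop := ∀ (text : String), Dom_collapse_blank_lines_outside_code text → Spec_collapse_blank_lines_outside_code text (collapse_blank_lines_outside_code text)

-- ===== LEMMAS AND PROOFS =====

-- ---- reference splitter (mirrors PySem.Chars.splitlines on Dom strings) ----
def pvRefSplit : List Char → List (List Char)
  | [] => []
  | '\r' :: '\n' :: rest => [] :: pvRefSplit rest
  | c :: rest =>
    if c = '\n' ∨ c = '\r' then [] :: pvRefSplit rest
    else match pvRefSplit rest with
      | [] => [[c]]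
      | l :: ls => (c :: l) :: ls

def pvWithin (cur : List Char) : List (List Char) → List (List Char)
  | [] => if cur = [] then [] else [cur]
  | l :: ls => (cur ++ l) :: ls

-- ---- line-shape predicates ----
def pvNoBrP (cs : List Char) : Prop := ∀ c ∈ cs, c ≠ '\n' ∧ c ≠ '\r'

def pvLineOK (l : List Char) : Prop :=
  ∃ core term, l = core ++ term ∧ pvNoBrP core ∧
    (term = ['\n'] ∨ term = ['\r'] ∨ term = ['\r', '\n'] ∨ (term = [] ∧ core ≠ []))

def pvTermd (l : List Char) : Prop := l.getLast? = some '\n' ∨ l.getLast? = some '\r'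

def pvAdjOK (l l' : List Char) : Prop := l.getLast? = some '\r' → l'.head? ≠ some '\n'

def pvChainOK : List (List Char) → Prop
  | [] => True
  | [l] => pvLineOK l
  | l :: l' :: ls => pvLineOK l ∧ pvTermd l ∧ pvAdjOK l l' ∧ pvChainOK (l' :: ls)

-- collapsed body and blank flag of a buffered region
def pvBody (buf : List (List Char)) : List Char :=
  PySem.Chars.join ['\n'] (((buf.map pvAltCore).foldl pvCollapseStep ([], false)).1)

def pvBlankOf (buf : List (List Char)) : Bool :=
  ((buf.map pvAltCore).foldl pvCollapseStep ([], false)).2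

-- ---- basic facts ----
lemma pvWithin_nil (r : List (List Char)) : pvWithin [] r = r := by
  cases r <;> simp [pvWithin]

lemma pvChar_eq_of_toNat (c d : Char) (h : c.toNat = d.toNat) : c = d := by
  apply Char.ext
  apply UInt32.toNat_inj.mp
  exact h

-- the concrete isB of PySem.Chars.splitlines is false on Dom chars that are not '\n'/'\r'
lemma pvIsB_false (c : Char) (hd : pvDomChar c = true) (h1 : c ≠ '\n') (h2 : c ≠ '\r') :
    (decide (c.toNat = 10) || decide (c.toNat = 13) || decide (c.toNat = 11) || decide (c.toNat = 12) ||
     decide (c.toNat = 28) || decide (c.toNat = 29) || decide (c.toNat = 30) || decide (c.toNat = 133) ||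
     decide (c.toNat = 8232) || decide (c.toNat = 8233)) = false := by
  have e1 : c.toNat ≠ 10 := fun h => h1 (pvChar_eq_of_toNat c '\n' (by rw [h]; rfl))
  have e2 : c.toNat ≠ 13 := fun h => h2 (pvChar_eq_of_toNat c '\r' (by rw [h]; rfl))
  simp only [pvDomChar, Bool.or_eq_true, Bool.and_eq_true, decide_eq_true_eq, beq_iff_eq] at hd
  simp only [Bool.or_eq_false_iff, decide_eq_false_iff_not]
  omega

lemma pvRefSplit_cons_nl (rest : List Char) : pvRefSplit ('\n' :: rest) = [] :: pvRefSplit rest := by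
  simp [pvRefSplit]

lemma pvRefSplit_cons_crnl (rest : List Char) : pvRefSplit ('\r' :: '\n' :: rest) = [] :: pvRefSplit rest := by
  simp [pvRefSplit]

lemma pvRefSplit_cons_cr (rest : List Char) (h : rest.head? ≠ some '\n') :
    pvRefSplit ('\r' :: rest) = [] :: pvRefSplit rest := by
  rcases rest with _ | ⟨x, xs⟩
  · simp [pvRefSplit]
  · have hx : x ≠ '\n' := by intro e; simp [e] at h
    simp [pvRefSplit, hx]

lemma pvRefSplit_cons_other (c : Char) (rest : List Char) (h1 : c ≠ '\n') (h2 : c ≠ '\r') :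
    pvRefSplit (c :: rest) = (match pvRefSplit rest with | [] => [[c]] | l :: ls => (c :: l) :: ls) := by
  rcases rest with _ | ⟨x, xs⟩
  · simp [pvRefSplit, h1, h2]
  · simp [pvRefSplit, h1, h2]

lemma pvLinesKE_cons_cr (rest : List Char) (h : rest.head? ≠ some '\n') :
    pvLinesKE ('\r' :: rest) = ['\r'] :: pvLinesKE rest := by
  rcases rest with _ | ⟨x, xs⟩
  · simp [pvLinesKE]
  · have hx : x ≠ '\n' := by intro e; simp [e] at h
    simp [pvLinesKE, hx]

lemma pvLinesKE_cons_other (c : Char) (rest : List Char) (h1 : c ≠ '\n') (h2 : c ≠ '\r') :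
    pvLinesKE (c :: rest) = (match pvLinesKE rest with | [] => [[c]] | l :: ls => (c :: l) :: ls) := by
  rcases rest with _ | ⟨x, xs⟩
  · simp [pvLinesKE, h1, h2]
  · simp [pvLinesKE, h1, h2]

lemma pvGo_eq (isB : Char → Bool) (hn : isB '\n' = true) (hr : isB '\r' = true) :
    ∀ (s cur : List Char) (acc : List (List Char)),
    (∀ c ∈ s, c ≠ '\n' → c ≠ '\r' → isB c = false) →
    PySem.Chars.splitlines.go isB s cur acc = acc.reverse ++ pvWithin cur.reverse (pvRefSplit s) := by
  intro s
  induction s using pvRefSplit.induct with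
  | case1 =>
    intro cur acc _
    simp [PySem.Chars.splitlines.go, pvRefSplit, pvWithin]
    split <;> simp_all [pvWithin]
  | case2 rest ih =>
    intro cur acc hs
    rw [PySem.Chars.splitlines.go]
    rw [ih [] (cur.reverse :: acc) (by intro c hc; exact hs c (by simp [hc]))]
    cases h : pvRefSplit rest <;> simp [pvRefSplit, pvWithin, h]
  | case3 c rest h1 h2 ih =>
    intro cur acc hs
    have hb : isB c = true := by rcases h2 with rfl | rfl; exact hn; exact hr
    rw [PySem.Chars.splitlines.go.eq_def]
    split
    · rename_i heq; exact absurd heq (by simp)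
    · rename_i rest2 heq
      injection heq with e1 e2
      exact absurd (h1 _ e1 e2) (by simp)
    · rename_i c2 rest2 hnp heq
      injection heq with e1 e2
      subst e1; subst e2
      rw [hb]
      simp only [if_true]
      rw [ih _ _ (fun d hd hd1 hd2 => hs d (List.mem_cons_of_mem _ hd) hd1 hd2)]
      rcases h2 with rfl | rfl
      · cases h : pvRefSplit rest <;>
          simp [pvRefSplit_cons_nl, pvWithin, h, pvWithin_nil]
      · have hh : rest.head? ≠ some '\n' := by
          intro e
          rcases rest with _ | ⟨x, xs⟩
          · simp at e
          · simp at e; exact h1 xs rfl (by rw [e])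
        cases h : pvRefSplit rest <;>
          simp [pvRefSplit_cons_cr rest hh, pvWithin, h, pvWithin_nil]
  | case4 c rest hnp hnb heq ih =>
    intro cur acc hs
    have hb : isB c = false := by
      push Not at hnb
      exact hs c (by simp) hnb.1 hnb.2
    rw [PySem.Chars.splitlines.go.eq_def]
    split
    · rename_i h; exact absurd h (by simp)
    · rename_i rest2 h
      injection h with e1 e2
      exact absurd (hnp _ e1 e2) (by simp)
    · rename_i c2 rest2 _ h
      injection h with e1 e2
      subst e1; subst e2
      rw [hb]
      simp only [Bool.false_eq_true, if_false]
      rw [ih _ _ (fun d hd hd1 hd2 => hs d (List.mem_cons_of_mem _ hd) hd1 hd2)]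
      push Not at hnb
      rw [pvRefSplit_cons_other c rest hnb.1 hnb.2, heq]
      simp [pvWithin, heq]
  | case5 c rest hnp hnb l ls heq ih =>
    intro cur acc hs
    have hb : isB c = false := by
      push Not at hnb
      exact hs c (by simp) hnb.1 hnb.2
    rw [PySem.Chars.splitlines.go.eq_def]
    split
    · rename_i h; exact absurd h (by simp)
    · rename_i rest2 h
      injection h with e1 e2
      exact absurd (hnp _ e1 e2) (by simp)
    · rename_i c2 rest2 _ h
      injection h with e1 e2
      subst e1; subst e2
      rw [hb]
      simp only [Bool.false_eq_true, if_false]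
      rw [ih _ _ (fun d hd hd1 hd2 => hs d (List.mem_cons_of_mem _ hd) hd1 hd2)]
      push Not at hnb
      rw [pvRefSplit_cons_other c rest hnb.1 hnb.2, heq]
      simp [pvWithin, heq]

lemma pvSplitlines_eq (s : List Char) (hs : s.all pvDomChar = true) :
    PySem.Chars.splitlines s = pvRefSplit s := by
  rw [PySem.Chars.splitlines]
  rw [pvGo_eq _ (by decide) (by decide) s [] []
    (fun c hc h1 h2 => pvIsB_false c (by simpa using (List.all_eq_true.mp hs c hc)) h1 h2)]
  simp [pvWithin_nil]

lemma pvLinesKE_flatten : ∀ s : List Char, (pvLinesKE s).flatten = s := by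
  intro s
  induction s using pvLinesKE.induct with
  | case1 => simp [pvLinesKE]
  | case2 rest ih => simp [pvLinesKE, ih]
  | case3 rest _ ih => simp [pvLinesKE, ih]
  | case4 rest hnp _ ih =>
    have hh : rest.head? ≠ some '\n' := by
      intro e
      rcases rest with _ | ⟨x, xs⟩
      · simp at e
      · simp at e; exact hnp xs rfl (by rw [e])
    rw [pvLinesKE_cons_cr rest hh]
    simp [ih]
  | case5 c rest _ h1 h2 heq ih =>
    rw [pvLinesKE_cons_other c rest h1 h2, heq]
    rw [heq] at ih
    simp at ih
    simp [ih.symm]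
  | case6 c rest _ h1 h2 l ls heq ih =>
    rw [pvLinesKE_cons_other c rest h1 h2, heq]
    rw [heq] at ih
    simpa using congrArg (c :: ·) ih

lemma pvLinesKE_head? : ∀ (s : List Char) (l : List Char) (ls : List (List Char)),
    pvLinesKE s = l :: ls → l.head? = s.head? := by
  intro s
  induction s using pvLinesKE.induct with
  | case1 => intro l ls h; simp [pvLinesKE] at h
  | case2 rest _ => intro l ls h; simp [pvLinesKE] at h; simp [h.1.symm]
  | case3 rest _ _ => intro l ls h; simp [pvLinesKE] at h; simp [h.1.symm]
  | case4 rest hnp _ _ =>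
    intro l ls h
    have hh : rest.head? ≠ some '\n' := by
      intro e
      rcases rest with _ | ⟨x, xs⟩
      · simp at e
      · simp at e; exact hnp xs rfl (by rw [e])
    rw [pvLinesKE_cons_cr rest hh] at h
    simp at h
    simp [h.1.symm]
  | case5 c rest _ h1 h2 heq _ =>
    intro l ls h
    rw [pvLinesKE_cons_other c rest h1 h2, heq] at h
    simp at h
    simp [h.1.symm]
  | case6 c rest _ h1 h2 l0 ls0 heq _ =>
    intro l ls h
    rw [pvLinesKE_cons_other c rest h1 h2, heq] at h
    simp at h
    simp [h.1.symm]

lemma pvChainOK_tail : ∀ {l : List Char} {ls : List (List Char)},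
    pvChainOK (l :: ls) → pvChainOK ls := by
  intro l ls h
  cases ls with
  | nil => trivial
  | cons l' ls' => exact h.2.2.2

lemma pvChainOK_drop : ∀ (xs ys : List (List Char)), pvChainOK (xs ++ ys) → pvChainOK ys := by
  intro xs
  induction xs with
  | nil => intro ys h; exact h
  | cons x xs ih => intro ys h; exact ih ys (pvChainOK_tail h)

lemma pvChainOK_prefix : ∀ (xs ys : List (List Char)), pvChainOK (xs ++ ys) → pvChainOK xs := by
  intro xs
  induction xs with
  | nil => intro ys _; trivial
  | cons x xs ih =>
    intro ys h
    rcases xs with _ | ⟨x', xs'⟩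
    · rcases ys with _ | ⟨y, ys'⟩
      · exact h
      · exact h.1
    · exact ⟨h.1, h.2.1, h.2.2.1, ih ys h.2.2.2⟩

lemma pvChainOK_cons_congr : ∀ {l m : List Char} {ls : List (List Char)},
    pvChainOK (l :: ls) → pvLineOK m → m.getLast? = l.getLast? → pvChainOK (m :: ls) := by
  intro l m ls h hm hg
  cases ls with
  | nil => exact hm
  | cons l' ls' =>
    exact ⟨hm, by rw [pvChainOK] at h; rw [pvTermd, hg]; exact h.2.1,
           by intro hx; exact h.2.2.1 (hg ▸ hx), h.2.2.2⟩

lemma pvLineOK_ne_nil {l : List Char} (h : pvLineOK l) : l ≠ [] := by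
  obtain ⟨core, term, rfl, -, hterm⟩ := h
  rcases hterm with rfl | rfl | rfl | ⟨rfl, hc⟩ <;> simp_all

lemma pvChainOK_cons_of (x : List Char) (L : List (List Char)) (hx : pvLineOK x) (ht : pvTermd x)
    (hadj : ∀ l' ls', L = l' :: ls' → pvAdjOK x l') (hc : pvChainOK L) : pvChainOK (x :: L) := by
  cases L with
  | nil => exact hx
  | cons l' ls' => exact ⟨hx, ht, hadj _ _ rfl, hc⟩

lemma pvChainOK_head {l : List Char} {ls : List (List Char)} (h : pvChainOK (l :: ls)) :
    pvLineOK l := by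
  cases ls with
  | nil => exact h
  | cons l' ls' => exact h.1

lemma pvLineOK_cons {l : List Char} (c : Char) (h : pvLineOK l) (h1 : c ≠ '\n') (h2 : c ≠ '\r') :
    pvLineOK (c :: l) := by
  obtain ⟨core, term, rfl, hnb, hterm⟩ := h
  refine ⟨c :: core, term, rfl, ?_, ?_⟩
  · intro d hd
    rcases List.mem_cons.mp hd with rfl | hd
    · exact ⟨h1, h2⟩
    · exact hnb d hd
  · rcases hterm with h | h | h | ⟨h, _⟩ <;> simp [h]

-- unterminated single line: no hypothesis on Dom is needed, breaks sit only at line ends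
lemma pvChainOK_of_linesKE : ∀ s : List Char, pvChainOK (pvLinesKE s) := by
  intro s
  induction s using pvLinesKE.induct with
  | case1 => trivial
  | case2 rest ih =>
    refine pvChainOK_cons_of _ _ ?_ ?_ ?_ ih
    · exact ⟨[], ['\r', '\n'], rfl, by simp [pvNoBrP], Or.inr (Or.inr (Or.inl rfl))⟩
    · exact Or.inl (by simp)
    · intro l' ls' _ hlast
      simp [pvAdjOK] at hlast
  | case3 rest _ ih =>
    refine pvChainOK_cons_of _ _ ?_ ?_ ?_ ih
    · exact ⟨[], ['\n'], rfl, by simp [pvNoBrP], Or.inl rfl⟩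
    · exact Or.inl (by simp)
    · intro l' ls' _ hlast
      simp at hlast
  | case4 rest hnp _ ih =>
    have hh : rest.head? ≠ some '\n' := by
      intro e
      rcases rest with _ | ⟨x, xs⟩
      · simp at e
      · simp at e; exact hnp xs rfl (by rw [e])
    rw [pvLinesKE_cons_cr rest hh]
    refine pvChainOK_cons_of _ _ ?_ ?_ ?_ ih
    · exact ⟨[], ['\r'], rfl, by simp [pvNoBrP], Or.inr (Or.inl rfl)⟩
    · exact Or.inr (by simp)
    · intro l' ls' hL _
      rw [pvLinesKE_head? rest l' ls' hL]
      exact hh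
  | case5 c rest _ h1 h2 heq _ =>
    rw [pvLinesKE_cons_other c rest h1 h2, heq]
    exact ⟨[c], [], rfl, by simp [pvNoBrP, h1, h2], Or.inr (Or.inr (Or.inr ⟨rfl, by simp⟩))⟩
  | case6 c rest _ h1 h2 l ls heq ih =>
    rw [pvLinesKE_cons_other c rest h1 h2, heq]
    rw [heq] at ih
    have hl : pvLineOK l := pvChainOK_head ih
    have hln : l ≠ [] := pvLineOK_ne_nil hl
    refine pvChainOK_cons_congr ih (pvLineOK_cons c hl h1 h2) ?_
    rcases l with _ | ⟨x, xs⟩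
    · simp at hln
    · simp [List.getLast?_cons_cons]

-- ---- pvAltCore on a decomposed line ----
lemma pvAltCore_eq (core term : List Char) (hnb : pvNoBrP core)
    (ht : term = ['\n'] ∨ term = ['\r'] ∨ term = ['\r', '\n'] ∨ term = []) :
    pvAltCore (core ++ term) = core := by
  rcases ht with rfl | rfl | rfl | rfl
  · have h1 : PySem.Chars.endswith (core ++ ['\n']) ['\r', '\n'] = false := by
      rw [Bool.eq_false_iff]
      intro h
      have hm : '\r' ∈ core ++ ['\n'] := ((PySem.Chars.endswith_iff _ _).mp h).subset (by simp)
      rcases List.mem_append.mp hm with h' | h'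
      · exact (hnb _ h').2 rfl
      · simp at h'
    have h2 : PySem.Chars.endswith (core ++ ['\n']) ['\n'] = true :=
      (PySem.Chars.endswith_iff _ _).mpr ⟨core, rfl⟩
    simp [pvAltCore, h1, h2, PySem.List.slice_to_neg_one]
  · have h1 : PySem.Chars.endswith (core ++ ['\r']) ['\r', '\n'] = false := by
      rw [Bool.eq_false_iff]
      intro h
      have hm : '\n' ∈ core ++ ['\r'] := ((PySem.Chars.endswith_iff _ _).mp h).subset (by simp)
      rcases List.mem_append.mp hm with h' | h'
      · exact (hnb _ h').1 rfl
      · simp at h'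
    have h2 : PySem.Chars.endswith (core ++ ['\r']) ['\n'] = false := by
      rw [Bool.eq_false_iff]
      intro h
      have hm : '\n' ∈ core ++ ['\r'] := ((PySem.Chars.endswith_iff _ _).mp h).subset (by simp)
      rcases List.mem_append.mp hm with h' | h'
      · exact (hnb _ h').1 rfl
      · simp at h'
    have h3 : PySem.Chars.endswith (core ++ ['\r']) ['\r'] = true :=
      (PySem.Chars.endswith_iff _ _).mpr ⟨core, rfl⟩
    simp [pvAltCore, h1, h2, h3, PySem.List.slice_to_neg_one]
  · have h1 : PySem.Chars.endswith (core ++ ['\r', '\n']) ['\r', '\n'] = true :=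
      (PySem.Chars.endswith_iff _ _).mpr ⟨core, rfl⟩
    rw [pvAltCore, h1]
    simp only [if_true]
    rw [PySem.List.slice_to_neg_ofNat _ 2 (by omega)]
    simp
  · have h1 : PySem.Chars.endswith (core ++ []) ['\r', '\n'] = false := by
      rw [Bool.eq_false_iff]
      intro h
      have hm : '\n' ∈ core ++ [] := ((PySem.Chars.endswith_iff _ _).mp h).subset (by simp)
      exact (hnb _ (by simpa using hm)).1 rfl
    have h2 : PySem.Chars.endswith (core ++ []) ['\n'] = false := by
      rw [Bool.eq_false_iff]
      intro h
      have hm : '\n' ∈ core ++ [] := ((PySem.Chars.endswith_iff _ _).mp h).subset (by simp)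
      exact (hnb _ (by simpa using hm)).1 rfl
    have h3 : PySem.Chars.endswith (core ++ []) ['\r'] = false := by
      rw [Bool.eq_false_iff]
      intro h
      have hm : '\r' ∈ core ++ [] := ((PySem.Chars.endswith_iff _ _).mp h).subset (by simp)
      exact (hnb _ (by simpa using hm)).2 rfl
    rw [List.append_nil] at h1 h2 h3 ⊢
    simp [pvAltCore, h1, h2, h3]

-- ---- pvRefSplit over proper lines ----
lemma pvRefSplit_nl (core : List Char) (hnb : pvNoBrP core) (rest : List Char) :
    pvRefSplit (core ++ '\n' :: rest) = core :: pvRefSplit rest := by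
  induction core with
  | nil => simpa using pvRefSplit_cons_nl rest
  | cons c cs ih =>
    have hc := hnb c (by simp)
    rw [List.cons_append, pvRefSplit_cons_other c _ hc.1 hc.2,
      ih (fun d hd => hnb d (List.mem_cons_of_mem _ hd))]

lemma pvRefSplit_crnl (core : List Char) (hnb : pvNoBrP core) (rest : List Char) :
    pvRefSplit (core ++ '\r' :: '\n' :: rest) = core :: pvRefSplit rest := by
  induction core with
  | nil => simpa using pvRefSplit_cons_crnl rest
  | cons c cs ih =>
    have hc := hnb c (by simp)
    rw [List.cons_append, pvRefSplit_cons_other c _ hc.1 hc.2,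
      ih (fun d hd => hnb d (List.mem_cons_of_mem _ hd))]

lemma pvRefSplit_cr (core : List Char) (hnb : pvNoBrP core) (rest : List Char)
    (hr : rest.head? ≠ some '\n') :
    pvRefSplit (core ++ '\r' :: rest) = core :: pvRefSplit rest := by
  induction core with
  | nil => simpa using pvRefSplit_cons_cr rest hr
  | cons c cs ih =>
    have hc := hnb c (by simp)
    rw [List.cons_append, pvRefSplit_cons_other c _ hc.1 hc.2,
      ih (fun d hd => hnb d (List.mem_cons_of_mem _ hd))]

lemma pvRefSplit_bare (core : List Char) (hnb : pvNoBrP core) (hne : core ≠ []) :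
    pvRefSplit core = [core] := by
  induction core with
  | nil => simp at hne
  | cons c cs ih =>
    have hc := hnb c (by simp)
    rw [pvRefSplit_cons_other c _ hc.1 hc.2]
    rcases cs with _ | ⟨x, xs⟩
    · simp [pvRefSplit]
    · rw [ih (fun d hd => hnb d (List.mem_cons_of_mem _ hd)) (by simp)]

lemma pvChainOK_all_lineOK : ∀ buf : List (List Char), pvChainOK buf → ∀ l ∈ buf, pvLineOK l := by
  intro buf
  induction buf with
  | nil => intro _ l hl; simp at hl
  | cons x xs ih =>
    intro h l hl
    rcases List.mem_cons.mp hl with rfl | hl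
    · exact pvChainOK_head h
    · exact ih (pvChainOK_tail h) l hl

lemma pvRefSplit_flatten : ∀ buf : List (List Char), pvChainOK buf →
    pvRefSplit buf.flatten = buf.map pvAltCore := by
  intro buf
  induction buf with
  | nil => intro _; simp [pvRefSplit]
  | cons l bs ih =>
    intro h
    obtain ⟨core, term, rfl, hnb, hterm⟩ := pvChainOK_head h
    have htl : pvChainOK bs := pvChainOK_tail h
    rw [List.flatten_cons, List.map_cons, List.append_assoc]
    rcases bs with _ | ⟨l', ls'⟩
    · simp only [List.flatten_nil, List.append_nil, List.map_nil]
      rcases hterm with rfl | rfl | rfl | ⟨rfl, hne⟩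
      · rw [show core ++ ['\n'] = core ++ '\n' :: ([] : List Char) by simp]
        rw [pvRefSplit_nl core hnb []]
        rw [show core ++ ('\n' :: ([] : List Char)) = core ++ ['\n'] by simp]
        rw [pvAltCore_eq core _ hnb (by simp), pvRefSplit]
      · rw [show core ++ ['\r'] = core ++ '\r' :: ([] : List Char) by simp]
        rw [pvRefSplit_cr core hnb [] (by simp)]
        rw [show core ++ ('\r' :: ([] : List Char)) = core ++ ['\r'] by simp]
        rw [pvAltCore_eq core _ hnb (by simp), pvRefSplit]
      · rw [show core ++ ['\r', '\n'] = core ++ '\r' :: '\n' :: ([] : List Char) by simp]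
        rw [pvRefSplit_crnl core hnb []]
        rw [show core ++ ('\r' :: '\n' :: ([] : List Char)) = core ++ ['\r', '\n'] by simp]
        rw [pvAltCore_eq core _ hnb (by simp), pvRefSplit]
      · rw [List.append_nil, pvRefSplit_bare core hnb hne]
        have hce := pvAltCore_eq core [] hnb (by simp)
        rw [List.append_nil] at hce
        rw [hce]
    · have hterm' : pvTermd (core ++ term) := h.2.1
      have hadj : pvAdjOK (core ++ term) l' := h.2.2.1
      have hl' : l' ≠ [] := pvLineOK_ne_nil (pvChainOK_head htl)
      have hhead : ((l' :: ls').flatten).head? = l'.head? := by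
        rcases l' with _ | ⟨x, xs⟩
        · simp at hl'
        · simp
      rcases hterm with rfl | rfl | rfl | ⟨rfl, hne⟩
      · rw [show core ++ (['\n'] ++ (l' :: ls').flatten)
            = core ++ '\n' :: (l' :: ls').flatten by simp]
        rw [pvRefSplit_nl core hnb _, ih htl, pvAltCore_eq core _ hnb (by simp)]
      · have hcr : (core ++ ['\r']).getLast? = some '\r' := by simp
        have hh : ((l' :: ls').flatten).head? ≠ some '\n' := by
          rw [hhead]; exact hadj hcr
        rw [show core ++ (['\r'] ++ (l' :: ls').flatten)
            = core ++ '\r' :: (l' :: ls').flatten by simp]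
        rw [pvRefSplit_cr core hnb _ hh, ih htl, pvAltCore_eq core _ hnb (by simp)]
      · rw [show core ++ (['\r', '\n'] ++ (l' :: ls').flatten)
            = core ++ '\r' :: '\n' :: (l' :: ls').flatten by simp]
        rw [pvRefSplit_crnl core hnb _, ih htl, pvAltCore_eq core _ hnb (by simp)]
      · exfalso
        rcases hterm' with hx | hx
        · rw [List.append_nil] at hx
          have := List.mem_of_getLast? hx
          exact (hnb _ this).1 rfl
        · rw [List.append_nil] at hx
          have := List.mem_of_getLast? hx
          exact (hnb _ this).2 rfl

-- ---- join / endswith helpers ----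
lemma pvJoin_nil_flatten (parts : List (List Char)) : PySem.Chars.join [] parts = parts.flatten := by
  induction parts with
  | nil => simp [PySem.Chars.join_nil]
  | cons x ps ih =>
    rcases ps with _ | ⟨y, qs⟩
    · simp [PySem.Chars.join_singleton]
    · rw [PySem.Chars.join_cons_cons, ih]
      simp

lemma pvJoin_append (sep : List Char) (parts : List (List Char)) (y : List Char) (h : parts ≠ []) :
    PySem.Chars.join sep (parts ++ [y]) = PySem.Chars.join sep parts ++ sep ++ y := by
  induction parts with
  | nil => simp at h
  | cons x ps ih =>
    rcases ps with _ | ⟨z, qs⟩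
    · simp [PySem.Chars.join_cons_cons, PySem.Chars.join_singleton]
    · have e : x :: (z :: qs ++ [y]) = x :: z :: (qs ++ [y]) := rfl
      rw [List.cons_append, e, PySem.Chars.join_cons_cons]
      have e2 : z :: (qs ++ [y]) = z :: qs ++ [y] := rfl
      rw [e2, ih (by simp), PySem.Chars.join_cons_cons]
      simp [List.append_assoc]

lemma pvEndswith_singleton (l : List Char) (c : Char) :
    PySem.Chars.endswith l [c] = (l.getLast? == some c) := by
  rcases List.eq_nil_or_concat l with rfl | ⟨t, a, rfl⟩
  · have h0 : PySem.Chars.endswith [] [c] = false := by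
      rw [Bool.eq_false_iff]
      intro h
      have := ((PySem.Chars.endswith_iff _ _).mp h).length_le
      simp at this
    rw [h0]
    simp
  · simp only [List.concat_eq_append]
    by_cases hac : a = c
    · subst hac
      rw [(PySem.Chars.endswith_iff _ _).mpr ⟨t, rfl⟩, List.getLast?_concat]
      simp
    · have h1 : PySem.Chars.endswith (t ++ [a]) [c] = false := by
        rw [Bool.eq_false_iff]
        intro h
        obtain ⟨u, hu⟩ := (PySem.Chars.endswith_iff _ _).mp h
        have := congrArg List.getLast? hu
        rw [List.getLast?_concat, List.getLast?_concat] at this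
        exact hac (by injection this with e; exact e.symm)
      rw [h1, List.getLast?_concat]
      simp [hac]

lemma pvFlatten_getLast? (buf : List (List Char)) (h : buf ≠ []) (hne : ∀ l ∈ buf, l ≠ []) :
    buf.flatten.getLast? = (buf.getLastD []).getLast? := by
  induction buf with
  | nil => simp at h
  | cons l bs ih =>
    rcases bs with _ | ⟨b, bs'⟩
    · simp
    · have hbne : (b :: bs').flatten ≠ [] := by
        have hb : b ≠ [] := hne b (by simp)
        rcases b with _ | ⟨x, xs⟩
        · simp at hb
        · simp
      rw [List.flatten_cons, List.getLast?_append_of_ne_nil _ hbne,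
        ih (by simp) (fun m hm => hne m (List.mem_cons_of_mem _ hm))]
      simp [List.getLastD]

-- fold nonemptiness
lemma pvFold_ne_nil : ∀ (cs : List (List Char)) (o : List (List Char)) (b : Bool), o ≠ [] →
    (cs.foldl pvCollapseStep (o, b)).1 ≠ [] := by
  intro cs
  induction cs with
  | nil => intro o b h; simpa using h
  | cons c cs ih =>
    intro o b h
    rw [List.foldl_cons]
    have ho2 : (pvCollapseStep (o, b) c).1 ≠ [] := by
      rw [pvCollapseStep]
      split
      · split
        · simpa using h
        · simp
      · simp
    have := ih (pvCollapseStep (o, b) c).1 (pvCollapseStep (o, b) c).2 ho2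
    simpa using this

lemma pvFold_nil_iff (buf : List (List Char)) :
    (((buf.map pvAltCore).foldl pvCollapseStep ([], false)).1 = [] ↔ buf = []) := by
  constructor
  · intro h
    rcases buf with _ | ⟨l, bs⟩
    · rfl
    · exfalso
      rw [List.map_cons, List.foldl_cons] at h
      have ho2 : (pvCollapseStep ([], false) (pvAltCore l)).1 ≠ [] := by
        rw [pvCollapseStep]
        split
        · simp
        · simp
      exact pvFold_ne_nil _ _ _ ho2 (by simpa using h)
  · intro h; subst h; rfl

-- ---- the collapse characterisation ----
lemma pvCollapseChunk_eq (buf : List (List Char)) (hc : pvChainOK buf) (hne : buf ≠ [])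
    (hdom : ∀ l ∈ buf, l.all pvDomChar = true) :
    pvCollapseChunk (PySem.Chars.join [] buf) =
      pvBody buf ++ (if PySem.Chars.endswith (buf.getLastD []) ['\n'] then ['\n'] else []) := by
  have hall : ∀ l ∈ buf, l ≠ [] := fun l hl => pvLineOK_ne_nil (pvChainOK_all_lineOK buf hc l hl)
  have hflat : buf.flatten.all pvDomChar = true := by
    rw [List.all_eq_true]
    intro c hcm
    obtain ⟨l, hl, hcl⟩ := List.mem_flatten.mp hcm
    exact List.all_eq_true.mp (hdom l hl) c hcl
  rw [pvJoin_nil_flatten, pvCollapseChunk]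
  rw [pvSplitlines_eq _ hflat, pvRefSplit_flatten buf hc]
  rw [pvEndswith_singleton, pvEndswith_singleton, pvFlatten_getLast? buf hne hall]
  rfl

-- incremental body update
lemma pvBody_append (buf : List (List Char)) (l : List Char) :
    pvBody (buf ++ [l]) = pvBody buf ++
      (if PySem.Chars.strip (pvAltCore l) = [] then
         (if pvBlankOf buf then [] else (if buf.isEmpty then [] else ['\n']))
       else (if buf.isEmpty then pvAltCore l else '\n' :: pvAltCore l)) := by
  rw [pvBody, pvBody, List.map_append, List.foldl_append]
  rcases hf : (buf.map pvAltCore).foldl pvCollapseStep ([], false) with ⟨o, b⟩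
  have hoiff : o = [] ↔ buf = [] := by
    have := pvFold_nil_iff buf
    rw [hf] at this
    exact this
  simp only [List.map_cons, List.map_nil, List.foldl_cons, List.foldl_nil]
  rw [pvCollapseStep]
  by_cases hstrip : PySem.Chars.strip (pvAltCore l) = []
  · rw [if_pos hstrip]
    have hbl : b = pvBlankOf buf := by rw [pvBlankOf, hf]
    by_cases hb : b = true
    · simp only [hb, if_true]
      rw [pvBlankOf, hf] at *
      simp [hstrip, ← hbl, hb]
    · have hb' : b = false := by simpa using hb
      simp only [hb', if_false]
      rcases ho : o with _ | ⟨x, xs⟩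
      · have hbe : buf = [] := hoiff.mp ho
        subst hbe
        simp [hstrip, ← hbl, hb', PySem.Chars.join_nil, PySem.Chars.join_singleton]
      · have hbne : buf ≠ [] := by
          intro hbe
          rw [hoiff.mpr hbe] at ho
          simp at ho
        simp only [Bool.false_eq_true, if_false]
        rw [pvJoin_append _ _ _ (by simp)]
        simp [hstrip, ← hbl, hb', hbne]
  · rw [if_neg hstrip]
    rcases ho : o with _ | ⟨x, xs⟩
    · have hbe : buf = [] := hoiff.mp ho
      subst hbe
      simp [hstrip, PySem.Chars.join_nil, PySem.Chars.join_singleton]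
    · have hbne : buf ≠ [] := by
        intro hbe
        rw [hoiff.mpr hbe] at ho
        simp at ho
      rw [pvJoin_append _ _ _ (by simp)]
      simp [hstrip, hbne]

lemma pvBlankOf_append (buf : List (List Char)) (l : List Char) :
    pvBlankOf (buf ++ [l]) = decide (PySem.Chars.strip (pvAltCore l) = []) := by
  rw [pvBlankOf, List.map_append, List.foldl_append]
  simp only [List.map_cons, List.map_nil, List.foldl_cons, List.foldl_nil]
  rw [pvCollapseStep]
  by_cases hstrip : PySem.Chars.strip (pvAltCore l) = []
  · rw [if_pos hstrip]
    split <;> simp_all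
  · rw [if_neg hstrip]
    simp [hstrip]

-- ---- fence-index bookkeeping ----
lemma pvEnum_cons {α : Type} (x : α) (xs : List α) (i : Int) :
    PySem.List.enumerate (x :: xs) i = (i, x) :: PySem.List.enumerate xs (i + 1) := by
  simp [PySem.List.enumerate]

-- ---- the main loop lemma ----
def pvFinishA (st : List (List Char) × List (List Char) × Bool) : List Char :=
  (if st.2.1.isEmpty then st.1
   else st.1 ++ [pvCollapseChunk (PySem.Chars.join [] st.2.1)]).flatten

def pvFinishB (st : List (List Char) × Bool × Bool × Bool × Bool) : List Char :=
  (if !st.2.1 && !st.2.2.1 then st.1 ++ [if st.2.2.2.2 then ['\n'] else []] else st.1).flatten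

lemma pvIsEmpty_false {α : Type} {l : List α} (h : l ≠ []) : l.isEmpty = false := by
  cases l
  · simp at h
  · simp

lemma pvLoop (igS : PySem.Set Int) (igI : Int)
    (hig : ∀ i : Int, 0 ≤ i → PySem.Set.contains igS i = (i == igI)) :
    ∀ (rest : List (List Char)) (i : Int) (outA buf outB : List (List Char))
      (inCode atStart blank lastNL : Bool),
    0 ≤ i →
    pvChainOK (buf ++ rest) →
    (∀ l ∈ buf ++ rest, l.all pvDomChar = true) →
    (inCode = true → buf = [] ∧ atStart = true ∧ blank = false) →
    (inCode = false → atStart = buf.isEmpty ∧ blank = pvBlankOf buf ∧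
       (buf ≠ [] → lastNL = PySem.Chars.endswith (buf.getLastD []) ['\n'])) →
    outB.flatten = outA.flatten ++ pvBody buf →
    pvFinishA ((PySem.List.enumerate rest i).foldl (pvApplyStep igS pvCollapseChunk) (outA, buf, inCode))
    = pvFinishB ((PySem.List.enumerate rest i).foldl (pvAltStep igI) (outB, inCode, atStart, blank, lastNL)) := by
  intro rest
  induction rest with
  | nil =>
    intro i outA buf outB inCode atStart blank lastNL hi hchain hdom hin hout hflat
    simp only [PySem.List.enumerate, List.foldl_nil]
    by_cases hc : inCode = true
    · obtain ⟨hb, ha, -⟩ := hin hc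
      subst hb
      simp [pvFinishA, pvFinishB, hc, ha, hflat, pvBody, PySem.Chars.join_nil]
    · have hc' : inCode = false := by simpa using hc
      obtain ⟨ha, hb, hl⟩ := hout hc'
      by_cases hbe : buf = []
      · subst hbe
        simp [pvFinishA, pvFinishB, hc', ha, hflat, pvBody, PySem.Chars.join_nil]
      · have hchainb : pvChainOK buf := by simpa using hchain
        have hdomb : ∀ l ∈ buf, l.all pvDomChar = true := by simpa using hdom
        have hcoll := pvCollapseChunk_eq buf hchainb hbe hdomb
        have hae : atStart = false := by rw [ha]; exact pvIsEmpty_false hbe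
        rw [pvFinishA, pvFinishB]
        simp only [hc', hae, Bool.not_false, Bool.and_self, if_true, pvIsEmpty_false hbe,
          Bool.false_eq_true, if_false]
        rw [List.flatten_append, List.flatten_append, hcoll, hflat, hl hbe]
        simp
  | cons l rest ih =>
    intro i outA buf outB inCode atStart blank lastNL hi hchain hdom hin hout hflat
    rw [pvEnum_cons, List.foldl_cons, List.foldl_cons]
    have hisf : (pvIsFenceLine l && (i != igI)) = (pvIsFenceLine l && !(PySem.Set.contains igS i)) := by
      rw [hig i hi]
      rfl
    have hdl : l.all pvDomChar = true := hdom l (by simp)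
    by_cases hf : (pvIsFenceLine l && !(PySem.Set.contains igS i)) = true
    · -- fence line
      have hbf : (pvIsFenceLine l && (i != igI)) = true := by rw [hisf]; exact hf
      by_cases hc : inCode = true
      · obtain ⟨hb, ha, hbl⟩ := hin hc
        subst hb
        rw [show pvApplyStep igS pvCollapseChunk (outA, [], inCode) (i, l)
            = (outA ++ [l], [], false) by
          simp only [pvApplyStep]
          rw [hf]
          simp [hc]]
        rw [show pvAltStep igI (outB, inCode, atStart, blank, lastNL) (i, l)
            = (outB ++ [l], false, true, false, lastNL) by
          simp only [pvAltStep]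
          rw [hbf]
          simp [hc]]
        refine ih (i + 1) (outA ++ [l]) [] (outB ++ [l]) false true false lastNL
          (by omega) (pvChainOK_tail (by simpa using hchain)) ?_ (by simp) ?_ ?_
        · intro m hm
          exact hdom m (by simp at hm ⊢; exact Or.inr hm)
        · intro _
          exact ⟨rfl, rfl, fun h => absurd rfl h⟩
        · simp [hflat, pvBody, PySem.Chars.join_nil]
      · have hc' : inCode = false := by simpa using hc
        obtain ⟨ha, hb, hl⟩ := hout hc'
        by_cases hbe : buf = []
        · subst hbe
          rw [show pvApplyStep igS pvCollapseChunk (outA, [], inCode) (i, l)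
              = (outA ++ [l], [], true) by
            simp only [pvApplyStep]
            rw [hf]
            simp [hc']]
          rw [show pvAltStep igI (outB, inCode, atStart, blank, lastNL) (i, l)
              = (outB ++ [l], true, true, false, lastNL) by
            simp only [pvAltStep]
            rw [hbf]
            simp [hc', ha]]
          refine ih (i + 1) (outA ++ [l]) [] (outB ++ [l]) true true false lastNL
            (by omega) (pvChainOK_tail (by simpa using hchain)) ?_
            (fun _ => ⟨rfl, rfl, rfl⟩) (by intro h; simp at h) ?_
          · intro m hm
            exact hdom m (by simp at hm ⊢; exact Or.inr hm)
          · simp [hflat, pvBody, PySem.Chars.join_nil]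
        · have hchainb : pvChainOK buf :=
            pvChainOK_prefix buf (l :: rest) hchain
          have hdomb : ∀ m ∈ buf, m.all pvDomChar = true :=
            fun m hm => hdom m (by simp [hm])
          have hcoll := pvCollapseChunk_eq buf hchainb hbe hdomb
          have hae : atStart = false := by rw [ha]; exact pvIsEmpty_false hbe
          rw [show pvApplyStep igS pvCollapseChunk (outA, buf, inCode) (i, l)
              = ((outA ++ [pvCollapseChunk (PySem.Chars.join [] buf)]) ++ [l], [], true) by
            simp only [pvApplyStep]
            rw [hf]
            simp [hc', pvIsEmpty_false hbe]]
          rw [show pvAltStep igI (outB, inCode, atStart, blank, lastNL) (i, l)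
              = ((outB ++ [if lastNL then ['\n'] else []]) ++ [l], true, true, false, lastNL) by
            simp only [pvAltStep]
            rw [hbf]
            simp [hc', hae]]
          refine ih (i + 1) ((outA ++ [pvCollapseChunk (PySem.Chars.join [] buf)]) ++ [l]) []
            ((outB ++ [if lastNL then ['\n'] else []]) ++ [l]) true true false lastNL
            (by omega) ?_ ?_ (fun _ => ⟨rfl, rfl, rfl⟩) (by intro h; simp at h) ?_
          · exact pvChainOK_drop (buf ++ [l]) rest (by simpa using hchain)
          · intro m hm
            exact hdom m (by simp at hm ⊢; exact Or.inr (Or.inr hm))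
          · rw [List.flatten_append, List.flatten_append, List.flatten_append,
              List.flatten_append, hflat, hcoll, hl hbe]
            simp [pvBody, PySem.Chars.join_nil]
    · -- not a fence
      have hf' : (pvIsFenceLine l && !(PySem.Set.contains igS i)) = false := by
        rw [Bool.eq_false_iff]
        exact hf
      have hbf : (pvIsFenceLine l && (i != igI)) = false := by rw [hisf]; exact hf'
      by_cases hc : inCode = true
      · obtain ⟨hb, ha, hbl⟩ := hin hc
        subst hb
        rw [show pvApplyStep igS pvCollapseChunk (outA, [], inCode) (i, l)
            = (outA ++ [l], [], true) by
          simp only [pvApplyStep]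
          rw [hf']
          simp [hc]]
        rw [show pvAltStep igI (outB, inCode, atStart, blank, lastNL) (i, l)
            = (outB ++ [l], true, atStart, blank, lastNL) by
          simp only [pvAltStep]
          rw [hbf]
          simp [hc]]
        refine ih (i + 1) (outA ++ [l]) [] (outB ++ [l]) true atStart blank lastNL
          (by omega) (pvChainOK_tail (by simpa using hchain)) ?_
          (fun _ => ⟨rfl, ha, hbl⟩) (by intro h; simp at h) ?_
        · intro m hm
          exact hdom m (by simp at hm ⊢; exact Or.inr hm)
        · simp [hflat, pvBody, PySem.Chars.join_nil]
      · have hc' : inCode = false := by simpa using hc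
        obtain ⟨ha, hb, hl⟩ := hout hc'
        rw [show pvApplyStep igS pvCollapseChunk (outA, buf, inCode) (i, l)
            = (outA, buf ++ [l], false) by
          simp only [pvApplyStep]
          rw [hf']
          simp [hc']]
        rw [show pvAltStep igI (outB, inCode, atStart, blank, lastNL) (i, l)
            = (if PySem.Chars.strip (pvAltCore l) = [] then
                 (if !blank then outB ++ [if atStart then [] else ['\n']] else outB)
               else outB ++ [if atStart then pvAltCore l else '\n' :: pvAltCore l],
               false, false, decide (PySem.Chars.strip (pvAltCore l) = []),
               PySem.Chars.endswith l ['\n']) by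
          simp only [pvAltStep]
          rw [hbf]
          simp [hc']]
        refine ih (i + 1) outA (buf ++ [l]) _ false false
          (decide (PySem.Chars.strip (pvAltCore l) = [])) (PySem.Chars.endswith l ['\n'])
          (by omega) (by simpa using hchain) (by simpa using hdom)
          (by intro h; simp at h) ?_ ?_
        · intro _
          refine ⟨by simp, (pvBlankOf_append buf l).symm, ?_⟩
          intro _
          rw [List.getLastD_concat]
        · rw [pvBody_append buf l, ha, hb]
          by_cases hstrip : PySem.Chars.strip (pvAltCore l) = []
          · simp only [hstrip, if_true, decide_true]
            by_cases hblk : pvBlankOf buf = true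
            · simp [hblk, hflat]
            · have hblk' : pvBlankOf buf = false := by simpa using hblk
              simp [hblk', hflat]
          · simp only [hstrip, if_false]
            simp [hstrip, hflat]

-- fence-count fold facts
def pvIdxs (ls : List (List Char)) (i : Int) : List Int :=
  ((PySem.List.enumerate ls i).filter (fun p => pvIsFenceLine p.2)).map (·.1)

lemma pvFcFold_found : ∀ (ls : List (List Char)) (i : Int) (c f : Int), 0 ≤ f →
    ((PySem.List.enumerate ls i).foldl
      (fun (st : Int × Int) p =>
        if pvIsFenceLine p.2 then (st.1 + 1, if st.2 < 0 then p.1 else st.2) else st) (c, f))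
    = (c + (pvIdxs ls i).length, f) := by
  intro ls
  induction ls with
  | nil => intro i c f _; simp [PySem.List.enumerate, pvIdxs]
  | cons l ls ih =>
    intro i c f hf
    rw [pvEnum_cons, List.foldl_cons]
    by_cases hl : pvIsFenceLine l
    · simp only [hl, if_true]
      rw [if_neg (by omega)]
      rw [ih (i + 1) (c + 1) f hf]
      simp [pvIdxs, pvEnum_cons, hl]
      omega
    · simp only [hl, Bool.false_eq_true, if_false]
      rw [ih (i + 1) c f hf]
      simp [pvIdxs, pvEnum_cons, hl]

lemma pvFcFold_search : ∀ (ls : List (List Char)) (i : Int) (c : Int), 0 ≤ i →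
    ((PySem.List.enumerate ls i).foldl
      (fun (st : Int × Int) p =>
        if pvIsFenceLine p.2 then (st.1 + 1, if st.2 < 0 then p.1 else st.2) else st) (c, -1))
    = (c + (pvIdxs ls i).length, (pvIdxs ls i).headD (-1)) := by
  intro ls
  induction ls with
  | nil => intro i c _; simp [PySem.List.enumerate, pvIdxs]
  | cons l ls ih =>
    intro i c hi
    rw [pvEnum_cons, List.foldl_cons]
    by_cases hl : pvIsFenceLine l
    · simp only [hl, if_true]
      rw [if_pos (by omega)]
      rw [pvFcFold_found ls (i + 1) (c + 1) i hi]
      simp [pvIdxs, pvEnum_cons, hl]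
      omega
    · simp only [hl, Bool.false_eq_true, if_false]
      rw [ih (i + 1) c (by omega)]
      simp [pvIdxs, pvEnum_cons, hl]


-- ===== VERDICT (by name: the statement is the Claim_ definition above) =====
lemma pvHig (lines : List (List Char)) :
    ∀ i : Int, 0 ≤ i →
      PySem.Set.contains
        (if (pvIdxs lines 0).length % 2 = 1 ∧ ¬ (pvIdxs lines 0).isEmpty then
           PySem.Set.add (PySem.Set.ofList []) (pvIdxs lines 0).headI
         else PySem.Set.ofList []) i
      = (i == (if PySem.Int.mod ((0 : Int) + (pvIdxs lines 0).length) 2 = 1 then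
                 (pvIdxs lines 0).headD (-1) else (-1 : Int))) := by
  intro i hi
  have hmod2 : PySem.Int.mod ((0 : Int) + (pvIdxs lines 0).length) 2
      = (((pvIdxs lines 0).length % 2 : Nat) : Int) := by
    rw [zero_add]
    exact_mod_cast PySem.Int.mod_natCast (pvIdxs lines 0).length 2
  by_cases hodd : (pvIdxs lines 0).length % 2 = 1
  · have hne : pvIdxs lines 0 ≠ [] := by
      intro h
      rw [h] at hodd
      simp at hodd
    rw [if_pos ⟨hodd, by simp [pvIsEmpty_false hne]⟩]
    rw [if_pos (by rw [hmod2]; exact_mod_cast hodd)]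
    have hsa : PySem.Set.add (PySem.Set.ofList []) (pvIdxs lines 0).headI
        = [(pvIdxs lines 0).headI] := rfl
    rw [hsa]
    have hhd : (pvIdxs lines 0).headD (-1) = (pvIdxs lines 0).headI := by
      rcases hx : pvIdxs lines 0 with _ | ⟨a, b⟩
      · exact absurd hx hne
      · rfl
    rw [hhd]
    show List.contains [(pvIdxs lines 0).headI] i = _
    rw [List.contains_cons]
    simp
  · rw [if_neg (fun h => hodd h.1)]
    rw [if_neg (by rw [hmod2]; intro h; exact hodd (by exact_mod_cast h))]
    have h1 : (i == (-1 : Int)) = false := by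
      simp only [Bool.eq_false_iff, ne_eq, beq_iff_eq]
      omega
    rw [h1]
    rfl

theorem collapse_blank_lines_outside_code_spec : Claim_equal_collapse_blank_lines_outside_code := by
  intro text hdom
  unfold Spec_collapse_blank_lines_outside_code
  rw [collapse_blank_lines_outside_code, collapse_blank_lines_outside_code_alt, pvApplyOutsideCode]
  have hs : text.toList.all pvDomChar = true := hdom
  have hchain : pvChainOK (pvLinesKE text.toList) := pvChainOK_of_linesKE text.toList
  have hdoml : ∀ l ∈ pvLinesKE text.toList, l.all pvDomChar = true := by
    intro l hl
    rw [List.all_eq_true]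
    intro c hcl
    refine List.all_eq_true.mp hs c ?_
    rw [← pvLinesKE_flatten text.toList]
    exact List.mem_flatten.mpr ⟨l, hl, hcl⟩
  rw [pvFcFold_search (pvLinesKE text.toList) 0 0 (by omega)]
  have hmain := pvLoop _ _ (pvHig (pvLinesKE text.toList)) (pvLinesKE text.toList) 0
    [] [] [] false true false false (by omega) (by simpa using hchain) (by simpa using hdoml)
    (by intro h; simp at h)
    (by intro _; exact ⟨rfl, rfl, fun h => absurd rfl h⟩)
    (by simp [pvBody, PySem.Chars.join_nil])
  rw [pvFinishA, pvFinishB] at hmain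
  rw [← pvJoin_nil_flatten, ← pvJoin_nil_flatten] at hmain
  exact congrArg String.ofList hmain
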